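-- pv_equiv track=rewrite | github.com/kotgire58/GraphRAG | retrieval/graph_retriever.py | _pick_critical_path
-- ===== SOURCE A (Python) =====
-- def _pick_critical_path(
--     entities: list[str],
--     traversal_paths: list[str],
-- ) -> str:
--     """Prefer paths that mention more query entities (e.g. patient + drug)."""
--     if not traversal_paths:
--         return ""
--     entity_lower = [e.lower() for e in entities if e]
--     best_path = traversal_paths[0]
--     best_score = -1
--     for path in traversal_paths:
--         pl = path.lower()
--         score = sum(1 for e in entity_lower if e in pl)
--         if score > best_score:
--             best_score = score
--             best_path = path
--         elif score == best_score and len(path) > len(best_path):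
--             best_path = path
--     return best_path
-- ===== SOURCE B (Python) =====
-- def _pick_critical_path(
--     entities: list[str],
--     traversal_paths: list[str],
-- ) -> str:
--     # Alternative decomposition: entity-outer transposed scoring into a counts
--     # vector, then a separate argmax pass over (count, path) pairs.
--     if not traversal_paths:
--         return ""
--     lows = [p.lower() for p in traversal_paths]
--     counts = [0] * len(traversal_paths)
--     for e in entities:
--         if e:
--             el = e.lower()
--             counts = [c + 1 if el in p else c for p, c in zip(lows, counts)]
--     best_c, best_p = counts[0], traversal_paths[0]
--     for c, p in zip(counts[1:], traversal_paths[1:]):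
--         if c > best_c or (c == best_c and len(p) > len(best_p)):
--             best_c, best_p = c, p
--     return best_p
-- ===== Notes on version B (the rewrite author's own statement) =====
-- stated objective: alternative
-- what changed: Replaces A's single path-outer loop carrying a running best with a -1 sentinel by a transposed entity-outer pass that builds a per-path match-count vector, followed by a separate argmax scan over (count, path) pairs.
import Mathlib
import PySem

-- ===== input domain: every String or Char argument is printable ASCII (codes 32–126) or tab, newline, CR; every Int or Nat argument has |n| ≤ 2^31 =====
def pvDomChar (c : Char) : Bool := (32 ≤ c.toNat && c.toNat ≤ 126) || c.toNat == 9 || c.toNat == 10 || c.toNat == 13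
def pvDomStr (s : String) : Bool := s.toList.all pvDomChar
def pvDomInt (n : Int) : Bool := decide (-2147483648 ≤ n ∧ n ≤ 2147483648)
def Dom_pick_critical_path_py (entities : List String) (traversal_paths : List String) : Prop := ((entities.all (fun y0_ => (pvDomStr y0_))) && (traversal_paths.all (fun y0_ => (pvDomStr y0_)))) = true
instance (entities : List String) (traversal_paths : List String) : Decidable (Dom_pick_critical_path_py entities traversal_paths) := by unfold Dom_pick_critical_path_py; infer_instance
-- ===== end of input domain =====

-- B replaces A's single path-outer best-so-far loop by an entity-outer transposed
-- count vector plus a separate argmax pass (alternative decomposition, same cost).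

-- ===== PORT A =====
-- A: one pass over paths carrying (best_path, best_score) with sentinel score -1.
def pick_critical_path_py (entities : List String) (traversal_paths : List String) : String :=
  match traversal_paths with
  | [] => ""
  | p0 :: _ =>
    let entity_lower := (entities.filter (fun e => e ≠ "")).map PySem.Str.lower
    (traversal_paths.foldl (fun (st : String × Int) path =>
      let pl := PySem.Str.lower path
      let score : Int := ((entity_lower.filter (fun e => PySem.Str.isIn e pl)).length : Int)
      if score > st.2 then (path, score)
      else if score = st.2 ∧ PySem.Str.len path > PySem.Str.len st.1 then (path, st.2)
      else st) (p0, (-1 : Int))).1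

-- ===== PORT B =====
-- B: entity-outer pass building a per-path count vector, then an argmax scan.
def pick_critical_path_py_alt (entities : List String) (traversal_paths : List String) : String :=
  match traversal_paths with
  | [] => ""
  | p0 :: rest =>
    let lows := (p0 :: rest).map PySem.Str.lower
    let counts : List Int := entities.foldl (fun (cnts : List Int) e =>
      if e ≠ "" then
        let el := PySem.Str.lower e
        (lows.zip cnts).map (fun pc => if PySem.Str.isIn el pc.1 then pc.2 + 1 else pc.2)
      else cnts) (List.replicate (p0 :: rest).length (0 : Int))
    ((counts.tail.zip rest).foldl (fun (st : Int × String) cp =>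
      if cp.1 > st.1 ∨ (cp.1 = st.1 ∧ PySem.Str.len cp.2 > PySem.Str.len st.2) then cp else st)
      (counts.headI, p0)).2

-- ===== PRECONDITION & SPEC =====
def Spec_pick_critical_path_py (entities : List String) (traversal_paths : List String) (out : String) : Prop := out = pick_critical_path_py_alt entities traversal_paths
instance (entities : List String) (traversal_paths : List String) (out : String) : Decidable (Spec_pick_critical_path_py entities traversal_paths out) := by unfold Spec_pick_critical_path_py; infer_instance

-- ===== CLAIM (what is proved, stated in full; the proofs are below) =====
def Claim_equal_pick_critical_path_py : Prop := ∀ (entities : List String) (traversal_paths : List String), Dom_pick_critical_path_py entities traversal_paths → Spec_pick_critical_path_py entities traversal_paths (pick_critical_path_py entities traversal_paths)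

-- ===== LEMMAS AND PROOFS =====

-- the common score of a path: how many (lowercased, nonempty) entities occur in its lowercase
def pvScore (entities : List String) (p : String) : Int :=
  (((entities.filter (fun e => e ≠ "")).map PySem.Str.lower).filter
      (fun e => PySem.Str.isIn e (PySem.Str.lower p))).length

-- zipping a list with its own map and mapping is a plain map
lemma pv_zip_map_self {α β γ : Type} (f : α → β) (g : α × β → γ) (l : List α) :
    ((l.zip (l.map f)).map g) = l.map (fun x => g (x, f x)) := by
  induction l with
  | nil => rfl
  | cons a t ih => simp [ih]

-- zipping the mapped scores with their paths pairs each path with its score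
lemma pv_zip_scores (s : String → Int) (l : List String) :
    (l.map s).zip l = l.map (fun p => (s p, p)) := by
  induction l with
  | nil => rfl
  | cons q t ih => simp [ih]

-- B's entity fold over a counts vector of the shape lows.map f stays of that shape,
-- adding each entity's indicator
lemma pv_counts_fold (es : List String) (lows : List String) (f : String → Int) :
    es.foldl (fun (cnts : List Int) e =>
        if e ≠ "" then
          (lows.zip cnts).map (fun pc =>
            if PySem.Str.isIn (PySem.Str.lower e) pc.1 then pc.2 + 1 else pc.2)
        else cnts) (lows.map f)
      = lows.map (fun pl => f pl +
          (((es.filter (fun e => e ≠ "")).map PySem.Str.lower).filter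
              (fun el => PySem.Str.isIn el pl)).length) := by
  induction es generalizing f with
  | nil => simp
  | cons e t ih =>
    by_cases he : e = ""
    · simp only [List.foldl_cons, he]
      simpa using ih f
    · simp only [List.foldl_cons, pv_zip_map_self]
      rw [if_pos (show e ≠ "" from he),
          ih (fun pl => if PySem.Str.isIn (PySem.Str.lower e) pl then f pl + 1 else f pl)]
      apply List.map_congr_left
      intro pl _
      by_cases h : PySem.Chars.isIn (PySem.Chars.lower e.toList) pl.toList
      · simp [he, h]
        omega
      · simp [he, h]

-- the two selection folds agree (B's state is A's state swapped, scores paired in)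
lemma pv_select_fold (entities : List String) (rest : List String) (bp : String) (bs : Int) :
    ((rest.map (fun p => (pvScore entities p, p))).foldl (fun (st : Int × String) cp =>
        if cp.1 > st.1 ∨ (cp.1 = st.1 ∧ PySem.Str.len cp.2 > PySem.Str.len st.2) then cp else st)
        (bs, bp)).2
      = (rest.foldl (fun (st : String × Int) path =>
          let pl := PySem.Str.lower path
          let score : Int :=
            ((((entities.filter (fun e => e ≠ "")).map PySem.Str.lower).filter
                (fun e => PySem.Str.isIn e pl)).length : Int)
          if score > st.2 then (path, score)
          else if score = st.2 ∧ PySem.Str.len path > PySem.Str.len st.1 then (path, st.2)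
          else st) (bp, bs)).1 := by
  induction rest generalizing bp bs with
  | nil => rfl
  | cons p t ih =>
    simp only [List.map_cons, List.foldl_cons]
    by_cases h1 : pvScore entities p > bs
    · rw [if_pos (Or.inl h1), if_pos (by simpa [pvScore] using h1)]
      exact ih p _
    · by_cases h2 : pvScore entities p = bs ∧ PySem.Str.len p > PySem.Str.len bp
      · rw [if_pos (Or.inr h2), if_neg (by simpa [pvScore] using h1),
            if_pos (by simpa [pvScore] using h2)]
        rw [← h2.1]
        exact ih p _
      · rw [if_neg (by simp only [pvScore] at h1 h2 ⊢; tauto),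
            if_neg (by simpa [pvScore] using h1), if_neg (by simpa [pvScore] using h2)]
        exact ih bp bs

-- ===== VERDICT (by name: the statement is the Claim_ definition above) =====
theorem pick_critical_path_py_spec : Claim_equal_pick_critical_path_py := by
  intro entities traversal_paths _
  unfold Spec_pick_critical_path_py pick_critical_path_py pick_critical_path_py_alt
  match traversal_paths with
  | [] => rfl
  | p0 :: rest =>
    simp only
    have hrep : List.replicate ((p0 :: rest) : List String).length (0 : Int)
        = ((p0 :: rest).map PySem.Str.lower).map (fun _ => (0 : Int)) := by
      simp [Function.comp_def, List.replicate_succ, List.map_const']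
    rw [hrep, pv_counts_fold]
    have hcounts : (((p0 :: rest).map PySem.Str.lower).map
        (fun pl => (0 : Int) +
          (((entities.filter (fun e => e ≠ "")).map PySem.Str.lower).filter
              (fun el => PySem.Str.isIn el pl)).length))
        = (p0 :: rest).map (fun p => pvScore entities p) := by
      rw [List.map_map]
      apply List.map_congr_left; intro p _
      simp [pvScore, Function.comp]
    rw [hcounts]
    simp only [List.map_cons, List.tail_cons, List.headI]
    rw [pv_zip_scores (fun p => pvScore entities p) rest]
    -- A's first iteration: score p0 ≥ 0 > -1, so the state becomes (p0, score p0)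
    have h0 : ((((entities.filter (fun e => e ≠ "")).map PySem.Str.lower).filter
        (fun e => PySem.Str.isIn e (PySem.Str.lower p0))).length : Int) > -1 := by
      omega
    rw [List.foldl_cons, if_pos h0]
    exact (pv_select_fold entities rest p0 (pvScore entities p0)).symm
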